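-- pv_equiv track=rewrite | github.com/XTZ206/ENGG1340-Spring25-Courseworks | assignments/assignment4/question1/tests/testcase.py | get_testcase_output
-- ===== SOURCE A (Python) =====
-- from typing import NewType
--
-- Word = NewType("Word", str)
--
-- def get_testcase_output(words: list[Word]) -> str:
--     bigrams: list[str] = []
--     counts: list[int] = []
--
--     for word in words:
--         for bigram in (word[i: i + 2] for i in range(len(word) - 1)):
--             if bigram not in bigrams:
--                 bigrams.append(bigram)
--                 counts.append(1)
--             else:
--                 counts[bigrams.index(bigram)] += 1
--
--     if not bigrams:
--         return ""
--
--     most_common_count = max(counts)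
--     most_common_bigram = bigrams[counts.index(most_common_count)]
--
--     prints: list[str] = []
--     for word in words:
--         if most_common_bigram in word and word not in prints:
--             prints.append(word)
--     return "\n".join(prints)
-- ===== SOURCE B (Python) =====
-- def get_testcase_output(words):
--     counts = {}
--     holders = {}
--     seen = {}
--     for word in words:
--         for i in range(len(word) - 1):
--             bg = word[i:i + 2]
--             counts[bg] = counts.get(bg, 0) + 1
--             s = seen.get(bg)
--             if s is None:
--                 s = set()
--                 seen[bg] = s
--                 holders[bg] = []
--             if word not in s:
--                 s.add(word)
--                 holders[bg].append(word)
--     if not counts: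
--         return ""
--     best, best_count = "", 0
--     for bg, c in counts.items():
--         if best_count < c:
--             best, best_count = bg, c
--     return "\n".join(holders[best])
-- ===== Notes on version B (the rewrite author's own statement) =====
-- stated objective: faster
-- what changed: One pass with dicts keyed by bigram (count, ordered word list, and a seen-set for O(1) dedup) replaces A's parallel bigram/count lists with per-occurrence linear scans and A's whole second substring pass over words; the winner is picked by one strict-> scan of the insertion-ordered counts.
import Mathlib
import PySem

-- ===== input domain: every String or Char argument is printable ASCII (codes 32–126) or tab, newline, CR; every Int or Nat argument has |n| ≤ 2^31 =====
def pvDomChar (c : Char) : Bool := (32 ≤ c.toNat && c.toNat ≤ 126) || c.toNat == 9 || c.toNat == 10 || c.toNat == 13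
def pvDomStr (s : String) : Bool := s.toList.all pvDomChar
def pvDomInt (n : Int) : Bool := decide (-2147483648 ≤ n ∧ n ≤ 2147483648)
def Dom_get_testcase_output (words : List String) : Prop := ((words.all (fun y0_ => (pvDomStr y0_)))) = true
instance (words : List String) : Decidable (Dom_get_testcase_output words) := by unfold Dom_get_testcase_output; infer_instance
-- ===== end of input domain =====

-- B replaces A's parallel bigram/count lists (per-occurrence list scans) and A's second substring
-- pass over words by one pass building a count dict, a per-bigram deduplicated word-list dict and a
-- per-bigram seen-set, then one strict-'>' scan of the insertion-ordered counts (measured faster).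

-- ===== PORT A =====
def get_testcase_output (words : List String) : String :=
  let st := words.foldl (fun (st : List String × List Int) word =>
      (PySem.List.pyRange 0 (PySem.Str.len word - 1) 1).foldl (fun st i =>
        let bigram := PySem.Str.slice word (some i) (some (i + 2))
        if !st.1.contains bigram then
          (st.1 ++ [bigram], st.2 ++ [1])
        else
          (st.1, match PySem.List.index? st.1 bigram with
                 | some k => st.2.set k (PySem.List.pyGetD st.2 (k : Int) 0 + 1)
                 | none => st.2)) st)
    ([], [])
  if st.1.isEmpty then ""
  else
    match PySem.List.max? st.2 (fun x => x) with
    | none => ""  -- unreachable: st.2 is nonempty whenever st.1 is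
    | some m =>
      let mcb := PySem.List.pyGetD st.1 (((PySem.List.index? st.2 m).getD 0 : Nat) : Int) ""
      let prints := words.foldl (fun acc w =>
        if PySem.Str.isIn mcb w && !acc.contains w then acc ++ [w] else acc) []
      PySem.Str.join "\n" prints

-- ===== PORT B =====
def get_testcase_output_alt (words : List String) : String :=
  let st := words.foldl (fun (st : PySem.Dict String Int ×
        (PySem.Dict String (List String) × PySem.Dict String (PySem.Set String))) word =>
      (PySem.List.pyRange 0 (PySem.Str.len word - 1) 1).foldl (fun st i =>
        let bg := PySem.Str.slice word (some i) (some (i + 2))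
        let cnt := st.1.insert bg (st.1.getD bg 0 + 1)
        let p1 := if st.2.2.contains bg then st.2
                  else (st.2.1.insert bg [], st.2.2.insert bg PySem.Set.empty)
        let s := p1.2.getD bg PySem.Set.empty
        let p2 := if s.contains word then p1
                  else (p1.1.insert bg (p1.1.getD bg [] ++ [word]), p1.2.insert bg (s.add word))
        (cnt, p2)) st)
    (PySem.Dict.empty, (PySem.Dict.empty, PySem.Dict.empty))
  if PySem.Dict.size st.1 == 0 then ""
  else
    let best := st.1.items.foldl (fun best p => if best.2 < p.2 then p else best) ("", 0)
    PySem.Str.join "\n" (st.2.1.getD best.1 [])  -- key always present here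

-- ===== PRECONDITION & SPEC =====
def Spec_get_testcase_output (words : List String) (out : String) : Prop := out = get_testcase_output_alt words
instance (words : List String) (out : String) : Decidable (Spec_get_testcase_output words out) := by unfold Spec_get_testcase_output; infer_instance

-- ===== CLAIM (what is proved, stated in full; the proofs are below) =====
def Claim_equal_get_testcase_output : Prop := ∀ (words : List String), Dom_get_testcase_output words → Spec_get_testcase_output words (get_testcase_output words)

-- ===== LEMMAS AND PROOFS =====

/-- The list of bigram occurrences of one word, in order. -/
def bigramsOf (w : String) : List String :=
  (PySem.List.pyRange 0 (PySem.Str.len w - 1) 1).map (fun i => PySem.Str.slice w (some i) (some (i + 2)))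

/-- All bigram occurrences of all words, in processing order. -/
def allB (ws : List String) : List String := ws.flatMap bigramsOf

/-- A's loop body, per bigram occurrence. -/
def aStep (st : List String × List Int) (b : String) : List String × List Int :=
  if !st.1.contains b then (st.1 ++ [b], st.2 ++ [1])
  else (st.1, match PySem.List.index? st.1 b with
              | some k => st.2.set k (PySem.List.pyGetD st.2 (k : Int) 0 + 1)
              | none => st.2)

/-- B's word-list/seen-set update, per bigram occurrence of word `w`. -/
def wStep2 (w : String)
    (p : PySem.Dict String (List String) × PySem.Dict String (PySem.Set String)) (b : String) :
    PySem.Dict String (List String) × PySem.Dict String (PySem.Set String) :=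
  let p1 := if p.2.contains b then p else (p.1.insert b [], p.2.insert b PySem.Set.empty)
  let s := p1.2.getD b PySem.Set.empty
  if s.contains w then p1
  else (p1.1.insert b (p1.1.getD b [] ++ [w]), p1.2.insert b (s.add w))

/-- The seen-set dict mirrors the word-list dict: same keys, same members. -/
def snInv (p : PySem.Dict String (List String) × PySem.Dict String (PySem.Set String)) : Prop :=
  (∀ c, p.2.contains c = p.1.contains c) ∧
  (∀ c x, x ∈ p.2.getD c PySem.Set.empty ↔ x ∈ p.1.getD c [])

/-- B's winner-scan step. -/
def pickStep (best p : String × Int) : String × Int := if best.2 < p.2 then p else best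

/-- Int version of the winner-scan step (for A's `max`). -/
def pickInt (a x : Int) : Int := if a < x then x else a

lemma ofList_snoc (l : List String) (b : String) :
    PySem.Set.ofList (l ++ [b]) = if b ∈ PySem.Set.ofList l then PySem.Set.ofList l else PySem.Set.ofList l ++ [b] := by
  simp [PySem.Set.ofList, List.foldl_append, PySem.Set.add]

lemma aStep_push (pre : List String) (b : String) :
    aStep (PySem.Set.ofList pre, (PySem.Set.ofList pre).map (fun x => (pre.count x : Int))) b
    = (PySem.Set.ofList (pre ++ [b]), (PySem.Set.ofList (pre ++ [b])).map (fun x => ((pre ++ [b]).count x : Int))) := by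
  by_cases hb : b ∈ pre
  · have hbs : b ∈ PySem.Set.ofList pre := (PySem.Set.mem_ofList pre b).mpr hb
    have hsnoc : PySem.Set.ofList (pre ++ [b]) = PySem.Set.ofList pre := by
      rw [ofList_snoc]; simp [hbs]
    obtain ⟨k, hk⟩ := Option.isSome_iff_exists.mp ((PySem.List.index?_isSome_iff _ _).mpr hbs)
    obtain ⟨hklt, hgk, hfirst⟩ := PySem.List.getElem_of_index?_eq_some hk
    have hnd := PySem.Set.nodup_ofList pre
    simp only [aStep]
    rw [if_neg (by simpa using hbs), hk, hsnoc]
    refine Prod.ext rfl ?_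
    show ((PySem.Set.ofList pre).map (fun x => (pre.count x : Int))).set k
        (PySem.List.pyGetD ((PySem.Set.ofList pre).map (fun x => (pre.count x : Int))) (k : Int) 0 + 1)
      = (PySem.Set.ofList pre).map (fun x => ((pre ++ [b]).count x : Int))
    have hmlen : k < ((PySem.Set.ofList pre).map (fun x => (pre.count x : Int))).length := by
      simpa using hklt
    have hv : PySem.List.pyGetD ((PySem.Set.ofList pre).map (fun x => (pre.count x : Int))) (k : Int) 0
        = (pre.count b : Int) := by
      rw [PySem.List.pyGetD_natCast, List.getD_eq_getElem _ _ hmlen]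
      simp [hgk]
    apply List.ext_getElem (by simp)
    intro j hj hj'
    have hjlen : j < (PySem.Set.ofList pre).length := by simpa using hj'
    rw [List.getElem_set]
    split
    · next hjk =>
      subst hjk
      simp [hv, List.count_append, hgk]
    · next hjk =>
      have hne : (PySem.Set.ofList pre)[j] ≠ b := by
        intro h
        exact hjk ((hnd.getElem_inj_iff.mp (h.trans hgk.symm)).symm)
      simp [List.count_append, Ne.symm hne]
  · have hbs : b ∉ PySem.Set.ofList pre := fun h => hb ((PySem.Set.mem_ofList pre b).mp h)
    have hsnoc : PySem.Set.ofList (pre ++ [b]) = PySem.Set.ofList pre ++ [b] := by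
      rw [ofList_snoc]; simp [hbs]
    simp only [aStep]
    rw [if_pos (by simpa using hbs), hsnoc]
    refine Prod.ext rfl ?_
    simp only [List.map_append, List.map_cons, List.map_nil]
    congr 1
    · apply List.map_congr_left
      intro x hx
      have hxb : x ≠ b := fun h => hbs (h ▸ hx)
      simp [List.count_append, Ne.symm hxb]
    · simp [List.count_append, List.count_eq_zero_of_not_mem hb]

lemma aFold (L pre : List String) :
    L.foldl aStep (PySem.Set.ofList pre, (PySem.Set.ofList pre).map (fun b => (pre.count b : Int)))
    = (PySem.Set.ofList (pre ++ L), (PySem.Set.ofList (pre ++ L)).map (fun b => ((pre ++ L).count b : Int))) := by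
  induction L generalizing pre with
  | nil => simp
  | cons b L ih =>
    have := ih (pre ++ [b])
    simp only [List.foldl_cons, aStep_push, this, List.append_assoc, List.singleton_append]

lemma wStep2_once (w : String)
    (p : PySem.Dict String (List String) × PySem.Dict String (PySem.Set String)) (x : String)
    (hInv : snInv p) :
    snInv (wStep2 w p x) ∧
    ∀ b, (wStep2 w p x).1.getD b [] =
      if b = x ∧ w ∉ p.1.getD b [] then p.1.getD b [] ++ [w] else p.1.getD b [] := by
  obtain ⟨hc, hm⟩ := hInv
  by_cases hcx : p.2.contains x = true
  · simp only [wStep2, hcx, if_true]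
    by_cases hws : (p.2.getD x PySem.Set.empty).contains w = true
    · simp only [hws, if_true]
      have hwl : w ∈ p.1.getD x [] := (hm x w).mp (by simpa using hws)
      refine ⟨⟨hc, hm⟩, ?_⟩
      intro b
      rw [if_neg]
      rintro ⟨rfl, hwn⟩
      exact hwn hwl
    · simp only [hws, Bool.false_eq_true, if_false]
      have hwns : w ∉ p.2.getD x PySem.Set.empty := by simpa using hws
      have hwnl : w ∉ p.1.getD x [] := fun hin => hwns ((hm x w).mpr hin)
      refine ⟨⟨?_, ?_⟩, ?_⟩
      · intro c
        simp only [PySem.Dict.contains_insert, hc]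
      · intro c y
        by_cases hcx2 : c = x
        · subst hcx2
          rw [PySem.Dict.getD_insert_self, PySem.Dict.getD_insert_self]
          rw [PySem.Set.mem_add, hm c y]
          simp [List.mem_append]
        · rw [PySem.Dict.getD_insert_of_ne _ _ _ hcx2, PySem.Dict.getD_insert_of_ne _ _ _ hcx2]
          exact hm c y
      · intro b
        by_cases hbx : b = x
        · subst hbx
          rw [PySem.Dict.getD_insert_self, if_pos ⟨rfl, hwnl⟩]
        · rw [PySem.Dict.getD_insert_of_ne _ _ _ hbx, if_neg (fun hq => hbx hq.1)]
  · have hcx2 : p.2.contains x = false := by simpa using hcx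
    have hcx1 : p.1.contains x = false := by rw [← hc]; exact hcx2
    have hlst : p.1.getD x [] = [] := PySem.Dict.getD_of_not_contains _ _ hcx1
    have hset : p.2.getD x PySem.Set.empty = PySem.Set.empty :=
      PySem.Dict.getD_of_not_contains _ _ hcx2
    simp only [wStep2, hcx2, Bool.false_eq_true, if_false]
    rw [PySem.Dict.getD_insert_self]
    rw [show (PySem.Set.empty : PySem.Set String).contains w = false from rfl]
    simp only [Bool.false_eq_true, if_false, PySem.Dict.getD_insert_self]
    refine ⟨⟨?_, ?_⟩, ?_⟩
    · intro c
      simp only [PySem.Dict.contains_insert, hc]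
    · intro c y
      by_cases hcx3 : c = x
      · subst hcx3
        rw [PySem.Dict.getD_insert_self, PySem.Dict.getD_insert_self]
        rw [PySem.Set.mem_add]
        simp [PySem.Set.empty]
      · rw [PySem.Dict.getD_insert_of_ne _ _ _ hcx3, PySem.Dict.getD_insert_of_ne _ _ _ hcx3,
          PySem.Dict.getD_insert_of_ne _ _ _ hcx3, PySem.Dict.getD_insert_of_ne _ _ _ hcx3]
        exact hm c y
    · intro b
      by_cases hbx : b = x
      · subst hbx
        rw [PySem.Dict.getD_insert_self, hlst, if_pos ⟨rfl, List.not_mem_nil⟩]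
      · rw [PySem.Dict.getD_insert_of_ne _ _ _ hbx, PySem.Dict.getD_insert_of_ne _ _ _ hbx,
          if_neg (fun hq => hbx hq.1)]

lemma wStep2_fold (w : String) (L : List String) :
    ∀ (p : PySem.Dict String (List String) × PySem.Dict String (PySem.Set String)),
    snInv p →
    snInv (L.foldl (wStep2 w) p) ∧
    ∀ b, ((L.foldl (wStep2 w) p).1.getD b []) =
      if b ∈ L ∧ w ∉ p.1.getD b [] then p.1.getD b [] ++ [w] else p.1.getD b [] := by
  induction L with
  | nil =>
    intro p h
    exact ⟨h, fun b => by simp⟩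
  | cons x L ih =>
    intro p h
    obtain ⟨h1, hstep⟩ := wStep2_once w p x h
    obtain ⟨h2, hfold⟩ := ih (wStep2 w p x) h1
    refine ⟨h2, ?_⟩
    intro b
    simp only [List.foldl_cons]
    rw [hfold b, hstep b]
    by_cases hxb : b = x
    · subst hxb
      by_cases hw : w ∈ p.1.getD b []
      · simp [hw]
      · simp [hw]
    · have hbx : ¬ b = x := hxb
      simp [hbx]

lemma snInv_empty : snInv (PySem.Dict.empty, PySem.Dict.empty) := by
  constructor
  · intro c
    simp [PySem.Dict.contains_empty]
  · intro c x
    simp [PySem.Dict.getD_empty, PySem.Set.empty]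

lemma wl_gen (ws : List String) (b : String) :
    ∀ (p : PySem.Dict String (List String) × PySem.Dict String (PySem.Set String)),
    snInv p →
    ((ws.foldl (fun p w => (bigramsOf w).foldl (wStep2 w) p) p).1.getD b []) =
    ws.foldl (fun acc w => if decide (b ∈ bigramsOf w) && !acc.contains w then acc ++ [w] else acc) (p.1.getD b []) := by
  induction ws with
  | nil => intro p _; rfl
  | cons w ws ih =>
    intro p hInv
    simp only [List.foldl_cons]
    obtain ⟨h1, hfold⟩ := wStep2_fold w (bigramsOf w) p hInv
    rw [ih _ h1]
    congr 1
    rw [hfold b]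
    by_cases h1' : b ∈ bigramsOf w <;> by_cases h2 : w ∈ p.1.getD b [] <;>
      simp [h1', h2]

lemma pickFold_spec (l : List (String × Int)) :
    ∀ a : String × Int, ∃ r, l.foldl pickStep a = r ∧
      ((r = a ∧ ∀ y ∈ l, y.2 ≤ a.2) ∨
       (∃ pre suf, l = pre ++ r :: suf ∧ a.2 < r.2 ∧
         (∀ y ∈ pre, y.2 < r.2) ∧ (∀ y ∈ suf, y.2 ≤ r.2))) := by
  induction l with
  | nil => intro a; exact ⟨a, rfl, Or.inl ⟨rfl, by simp⟩⟩
  | cons x l ih =>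
    intro a
    by_cases hax : a.2 < x.2
    · have hpick : pickStep a x = x := by simp [pickStep, hax]
      obtain ⟨r, hr, hcase⟩ := ih x
      refine ⟨r, by simp only [List.foldl_cons, hpick, hr], ?_⟩
      right
      rcases hcase with ⟨heq, hle⟩ | ⟨pre, suf, hdec, hlt, hpre, hsuf⟩
      · subst heq
        exact ⟨[], l, by simp, hax, by simp, hle⟩
      · refine ⟨x :: pre, suf, by simp [hdec], lt_trans hax hlt, ?_, hsuf⟩
        intro y hy
        rcases List.mem_cons.mp hy with h | h
        · subst h; exact hlt
        · exact hpre y h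
    · have hpick : pickStep a x = a := by simp [pickStep, hax]
      obtain ⟨r, hr, hcase⟩ := ih a
      refine ⟨r, by simp only [List.foldl_cons, hpick, hr], ?_⟩
      rcases hcase with ⟨heq, hle⟩ | ⟨pre, suf, hdec, hlt, hpre, hsuf⟩
      · left
        refine ⟨heq, ?_⟩
        intro y hy
        rcases List.mem_cons.mp hy with h | h
        · subst h; omega
        · exact hle y h
      · right
        refine ⟨x :: pre, suf, by simp [hdec], hlt, ?_, hsuf⟩
        intro y hy
        rcases List.mem_cons.mp hy with h | h
        · subst h; omega
        · exact hpre y h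

lemma maxInt_cons (l : List Int) :
    ∀ a : Int, PySem.List.max? (a :: l) (fun x => x) = some (l.foldl pickInt a) := by
  induction l with
  | nil => intro a; rfl
  | cons x l ih =>
    intro a
    have h1 : PySem.List.max? (a :: x :: l) (fun x => x) = PySem.List.max? (pickInt a x :: l) (fun x => x) := by
      simp only [PySem.List.max?, List.foldl_cons]
      congr 1
      show (if a < x then some x else some a) = some (pickInt a x)
      simp only [pickInt]
      split <;> rfl
    rw [h1, ih]
    simp only [List.foldl_cons]

lemma snd_pickFold (l : List (String × Int)) :
    ∀ a, (l.foldl pickStep a).2 = (l.map Prod.snd).foldl pickInt a.2 := by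
  induction l with
  | nil => intro a; rfl
  | cons x l ih =>
    intro a
    simp only [List.foldl_cons, List.map_cons, ih]
    congr 1
    simp only [pickStep, pickInt]
    split <;> rfl

lemma bigram_len (w b : String) (h : b ∈ bigramsOf w) : b.toList.length = 2 := by
  simp only [bigramsOf, List.mem_map] at h
  obtain ⟨i, hi, hb⟩ := h
  rw [PySem.List.mem_pyRange_one] at hi
  obtain ⟨hi0, hilt⟩ := hi
  simp only [PySem.Str.len_eq] at hilt
  subst hb
  have hl : (PySem.Str.slice w (some i) (some (i + 2))).toList
      = PySem.List.slice w.toList (some i) (some (i + 2)) := by simp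
  rw [hl, PySem.List.slice_toNat _ hi0 (by omega)]
  rw [List.length_take, List.length_drop]
  omega

lemma isIn_eq_mem (b w : String) (hlen : b.toList.length = 2) :
    PySem.Str.isIn b w = decide (b ∈ bigramsOf w) := by
  rw [Bool.eq_iff_iff]
  simp only [decide_eq_true_eq]
  rw [PySem.Str.isIn_iff_infix]
  constructor
  · intro hinf
    obtain ⟨j, hpre⟩ := (PySem.Chars.exists_prefix_drop_iff_isIn (sub := b.toList) (s := w.toList)).symm.mp
      (by rwa [PySem.Chars.isIn_iff_infix])
    have htake : b.toList = (w.toList.drop j).take 2 := by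
      have h2 := List.prefix_iff_eq_take.mp hpre
      rwa [hlen] at h2
    have hbound : j + 2 ≤ w.toList.length := by
      have h2 : ((w.toList.drop j).take 2).length = 2 := by rw [← htake, hlen]
      rw [List.length_take, List.length_drop] at h2
      omega
    simp only [bigramsOf, List.mem_map]
    refine ⟨(j : Int), ?_, ?_⟩
    · rw [PySem.List.mem_pyRange_one]
      refine ⟨Int.natCast_nonneg j, ?_⟩
      simp only [PySem.Str.len_eq]
      omega
    · apply String.toList_inj.mp
      have hl : (PySem.Str.slice w (some (j : Int)) (some ((j : Int) + 2))).toList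
          = PySem.List.slice w.toList (some (j : Int)) (some ((j : Int) + 2)) := by simp
      rw [hl, PySem.List.slice_toNat _ (Int.natCast_nonneg j) (by omega)]
      rw [show ((j : Int) + 2).toNat = j + 2 by omega, Int.toNat_natCast]
      rw [htake]
      congr 1
      omega
  · intro hmem
    simp only [bigramsOf, List.mem_map] at hmem
    obtain ⟨i, hi, hb⟩ := hmem
    rw [PySem.List.mem_pyRange_one] at hi
    obtain ⟨hi0, hilt⟩ := hi
    simp only [PySem.Str.len_eq] at hilt
    have hpre : b.toList <+: w.toList.drop i.toNat := by
      rw [← hb]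
      have hl : (PySem.Str.slice w (some i) (some (i + 2))).toList
          = List.take ((i + 2).toNat - i.toNat) (List.drop i.toNat w.toList) := by
        rw [show (PySem.Str.slice w (some i) (some (i + 2))).toList
            = PySem.List.slice w.toList (some i) (some (i + 2)) from by simp]
        exact PySem.List.slice_toNat _ hi0 (by omega)
      rw [hl]
      exact List.take_prefix _ _
    have hin := (PySem.Chars.exists_prefix_drop_iff_isIn (sub := b.toList) (s := w.toList)).mp ⟨i.toNat, hpre⟩
    rwa [PySem.Chars.isIn_iff_infix] at hin

theorem get_testcase_output_spec : Claim_equal_get_testcase_output := by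
  intro words _hdom
  unfold Spec_get_testcase_output
  unfold get_testcase_output get_testcase_output_alt
  have hAin : (fun (st : List String × List Int) (word : String) =>
      (PySem.List.pyRange 0 (PySem.Str.len word - 1) 1).foldl (fun (st : List String × List Int) i =>
        let bigram := PySem.Str.slice word (some i) (some (i + 2))
        if !st.1.contains bigram then (st.1 ++ [bigram], st.2 ++ [1])
        else (st.1, match PySem.List.index? st.1 bigram with
                    | some k => st.2.set k (PySem.List.pyGetD st.2 (k : Int) 0 + 1)
                    | none => st.2)) st)
      = (fun st word => (bigramsOf word).foldl aStep st) := by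
    funext st w
    rw [bigramsOf, List.foldl_map]
    rfl
  have hBin : (fun (st : PySem.Dict String Int ×
        (PySem.Dict String (List String) × PySem.Dict String (PySem.Set String))) (word : String) =>
      (PySem.List.pyRange 0 (PySem.Str.len word - 1) 1).foldl (fun st i =>
        let bg := PySem.Str.slice word (some i) (some (i + 2))
        let cnt := st.1.insert bg (st.1.getD bg 0 + 1)
        let p1 := if st.2.2.contains bg then st.2
                  else (st.2.1.insert bg [], st.2.2.insert bg PySem.Set.empty)
        let s := p1.2.getD bg PySem.Set.empty
        let p2 := if s.contains word then p1
                  else (p1.1.insert bg (p1.1.getD bg [] ++ [word]), p1.2.insert bg (s.add word))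
        (cnt, p2)) st)
      = (fun st word => ((bigramsOf word).foldl (fun c b => c.insert b (c.getD b 0 + 1)) st.1,
                         (bigramsOf word).foldl (wStep2 word) st.2)) := by
    funext st w
    obtain ⟨c, d⟩ := st
    show _ = ((bigramsOf w).foldl (fun c b => c.insert b (c.getD b 0 + 1)) c,
              (bigramsOf w).foldl (wStep2 w) d)
    rw [← PySem.List.foldl_prod_mk (fun c b => c.insert b (c.getD b 0 + 1)) (wStep2 w) (bigramsOf w) c d]
    rw [bigramsOf, List.foldl_map]
    rfl
  rw [hAin, hBin]
  rw [← List.foldl_flatMap]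
  have hsplit : List.foldl (fun (st : PySem.Dict String Int ×
        (PySem.Dict String (List String) × PySem.Dict String (PySem.Set String))) (word : String) =>
      (List.foldl (fun c b => PySem.Dict.insert c b (c.getD b 0 + 1)) st.1 (bigramsOf word),
       List.foldl (wStep2 word) st.2 (bigramsOf word)))
      (PySem.Dict.empty, (PySem.Dict.empty, PySem.Dict.empty)) words
    = (words.foldl (fun c (word : String) => (bigramsOf word).foldl (fun c b => c.insert b (c.getD b 0 + 1)) c) PySem.Dict.empty,
       words.foldl (fun p (word : String) => (bigramsOf word).foldl (wStep2 word) p) (PySem.Dict.empty, PySem.Dict.empty)) :=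
    PySem.List.foldl_prod_mk
      (fun c (word : String) => (bigramsOf word).foldl (fun c b => PySem.Dict.insert c b (c.getD b 0 + 1)) c)
      (fun p (word : String) => (bigramsOf word).foldl (wStep2 word) p)
      words PySem.Dict.empty (PySem.Dict.empty, PySem.Dict.empty)
  rw [hsplit, ← List.foldl_flatMap, PySem.Dict.foldl_insert_getD_add_one_eq_counter]
  have hst : (List.flatMap bigramsOf words).foldl aStep ([], []) =
      (PySem.Set.ofList (allB words),
       (PySem.Set.ofList (allB words)).map (fun b => ((allB words).count b : Int))) := by
    have h := aFold (allB words) []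
    simpa [allB] using h
  rw [hst]
  rw [show List.flatMap bigramsOf words = allB words from rfl]
  rcases h : PySem.Set.ofList (allB words) with _ | ⟨d0, ds2⟩
  · -- no bigram at all: both sides return ""
    have hitems : (PySem.Dict.counter (allB words)).items = [] := by
      rw [PySem.Dict.items_counter, h]; rfl
    simp [PySem.Dict.size, hitems]
  · -- at least one bigram
    have hd0N : d0 ∈ allB words := (PySem.Set.mem_ofList _ d0).mp (h ▸ List.mem_cons_self)
    have hpos : (0 : Int) < ((allB words).count d0 : Int) := by
      exact_mod_cast List.count_pos_iff.mpr hd0N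
    have hitems : (PySem.Dict.counter (allB words)).items
        = (d0, ((allB words).count d0 : Int)) :: ds2.map (fun b => (b, ((allB words).count b : Int))) := by
      rw [PySem.Dict.items_counter, h, List.map_cons]
    have hsize : ((PySem.Dict.counter (allB words)).size == 0) = false := by
      simp [PySem.Dict.size, hitems]
    simp only [hitems, hsize, List.map_cons, List.isEmpty_cons, Bool.false_eq_true, if_false]
    rw [show (fun (best p : String × Int) => if best.2 < p.2 then p else best) = pickStep from rfl]
    rw [List.foldl_cons,
      show pickStep ("", 0) (d0, ((allB words).count d0 : Int))
         = (d0, ((allB words).count d0 : Int)) from by simp only [pickStep]; exact if_pos hpos]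
    obtain ⟨r, hr, hcase⟩ := pickFold_spec (ds2.map (fun b => (b, ((allB words).count b : Int))))
      (d0, ((allB words).count d0 : Int))
    rw [hr]
    rw [maxInt_cons]
    have hM : (ds2.map (fun b => ((allB words).count b : Int))).foldl pickInt ((allB words).count d0 : Int)
        = r.2 := by
      rw [← hr, snd_pickFold, List.map_map]
      rfl
    rw [hM]
    show PySem.Str.join "\n"
        (List.foldl (fun acc w =>
          if (PySem.Str.isIn (PySem.List.pyGetD (d0 :: ds2)
                (((PySem.List.index? ((((allB words).count d0 : Int)) :: List.map (fun b => (((allB words).count b : Int))) ds2) r.2).getD 0 : Nat) : Int) "") w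
              && !acc.contains w) = true then acc ++ [w] else acc) [] words)
      = PySem.Str.join "\n"
        ((List.foldl (fun p word => List.foldl (wStep2 word) p (bigramsOf word))
            (PySem.Dict.empty, PySem.Dict.empty) words).1.getD r.1 [])
    -- the selected bigram is r.1
    have hmain : PySem.List.pyGetD (d0 :: ds2)
        (((PySem.List.index? ((((allB words).count d0 : Int)) :: List.map (fun b => (((allB words).count b : Int))) ds2) r.2).getD 0 : Nat) : Int) "" = r.1 := by
      rcases hcase with ⟨heq, hle⟩ | ⟨pre, suf, hdec, hlt, hpre, hsuf⟩
      · subst heq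
        rw [PySem.List.index?_cons_self]
        simp
      · rw [List.map_eq_append_iff] at hdec
        obtain ⟨l1, l2, hds2, hm1, hm2⟩ := hdec
        rw [List.map_eq_cons_iff] at hm2
        obtain ⟨a, l2', hl2, hga, hm2'⟩ := hm2
        have ha1 : a = r.1 := congrArg Prod.fst hga
        have ha2 : ((allB words).count a : Int) = r.2 := congrArg Prod.snd hga
        have hidx : PySem.List.index?
            ((((allB words).count d0 : Int)) :: List.map (fun b => (((allB words).count b : Int))) ds2) r.2
            = some (l1.length + 1) := by
          rw [PySem.List.index?_eq_some_iff]
          refine ⟨(((allB words).count d0 : Int)) :: l1.map (fun b => (((allB words).count b : Int))), l2'.map (fun b => (((allB words).count b : Int))), ?_, by simp, ?_⟩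
          · rw [hds2, hl2]
            simp [ha2]
          · intro hmem
            rcases List.mem_cons.mp hmem with hc | hc
            · omega
            · rw [List.mem_map] at hc
              obtain ⟨x, hx, hfx⟩ := hc
              have : (x, ((allB words).count x : Int)) ∈ pre := hm1 ▸ List.mem_map_of_mem hx
              have := hpre _ this
              simp at this
              omega
        rw [hidx]
        simp only [Option.getD_some]
        rw [PySem.List.pyGetD_natCast]
        have hlb : l1.length + 1 < (d0 :: ds2).length := by
          simp [hds2, hl2]
        rw [List.getD_eq_getElem _ _ hlb]
        rw [← ha1]
        show (d0 :: ds2)[l1.length + 1] = a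
        rw [List.getElem_cons_succ]
        have : ds2 = l1 ++ a :: l2' := by rw [hds2, hl2]
        subst this
        rw [List.getElem_append_right (by omega)]
        simp
    rw [hmain]
    -- r.1 is a real bigram, hence of length 2
    have hr1mem : r.1 ∈ allB words := by
      have hrmem : r.1 ∈ d0 :: ds2 := by
        rcases hcase with ⟨heq, hle⟩ | ⟨pre, suf, hdec, hlt, hpre, hsuf⟩
        · rw [heq]; exact List.mem_cons_self
        · have : r ∈ ds2.map (fun b => (b, ((allB words).count b : Int))) := by
            rw [hdec]
            exact List.mem_append_right _ List.mem_cons_self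
          rw [List.mem_map] at this
          obtain ⟨x, hx, hgx⟩ := this
          have : x = r.1 := congrArg Prod.fst hgx
          exact this ▸ List.mem_cons_of_mem _ hx
      exact (PySem.Set.mem_ofList _ _).mp (h ▸ hrmem)
    have hlen2 : r.1.toList.length = 2 := by
      rw [allB, List.mem_flatMap] at hr1mem
      obtain ⟨w, _, hw⟩ := hr1mem
      exact bigram_len w r.1 hw
    -- A's final pass builds exactly B's stored word list
    rw [wl_gen words r.1 (PySem.Dict.empty, PySem.Dict.empty) snInv_empty]
    rw [show ((PySem.Dict.empty, PySem.Dict.empty) : PySem.Dict String (List String) ×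
        PySem.Dict String (PySem.Set String)).1.getD r.1 [] = [] from PySem.Dict.getD_empty _ _]
    have hfun : (fun (acc : List String) (w : String) =>
          if (PySem.Str.isIn r.1 w && !acc.contains w) = true then acc ++ [w] else acc)
        = (fun (acc : List String) (w : String) =>
          if (decide (r.1 ∈ bigramsOf w) && !acc.contains w) = true then acc ++ [w] else acc) := by
      funext acc w
      rw [isIn_eq_mem _ _ hlen2]
    rw [hfun]
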